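-- pv_equiv track=rewrite | github.com/SwissArmyKnifeTD/HoudiniPythonTools | scripts/python/tools/ls_tex_to_mtlx.py | _find_ao_textures
-- ===== SOURCE A (Python) =====
-- def _find_ao_textures(material_lib_info):
--     """
--     Find ao texture
--     Args:
--         material_lib_info : dictionnary that contains the info regarding the material
--     Return:
--         dictionnary with ao value
--     """
--
--     texture_type_sorted = {
--         "texturesColor" : ["diffuse", "diff", "albedo", "alb", "base", "col", "color", "basecolor"],
--         "texturesAO" : ["ao", "ambient_occlusion", "occlusion", "cavity"]
--     }
--
--     result = {
--         "color" : None,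
--         "ao" : None
--     }
--
--     for texture in material_lib_info:
--         for texture_name, texture_value in texture_type_sorted.items():
--             if texture in texture_value:
--                 key = "ao" if texture_name == "texturesAO" else "color"
--                 result[key] = texture
--
--     return result
-- ===== SOURCE B (Python) =====
-- def _find_ao_textures(material_lib_info):
--     color_keys = {"diffuse", "diff", "albedo", "alb", "base", "col", "color", "basecolor"}
--     ao_keys = {"ao", "ambient_occlusion", "occlusion", "cavity"}
--     textures = list(material_lib_info)
--     return {
--         "color": next((t for t in reversed(textures) if t in color_keys), None),
--         "ao": next((t for t in reversed(textures) if t in ao_keys), None),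
--     }
-- ===== Notes on version B (the rewrite author's own statement) =====
-- stated objective: simpler
-- what changed: Replaced the nested loop with dict mutation by two independent reverse scans that pick the last matching keyword per key directly, using set membership instead of repeated list scans.
import Mathlib
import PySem

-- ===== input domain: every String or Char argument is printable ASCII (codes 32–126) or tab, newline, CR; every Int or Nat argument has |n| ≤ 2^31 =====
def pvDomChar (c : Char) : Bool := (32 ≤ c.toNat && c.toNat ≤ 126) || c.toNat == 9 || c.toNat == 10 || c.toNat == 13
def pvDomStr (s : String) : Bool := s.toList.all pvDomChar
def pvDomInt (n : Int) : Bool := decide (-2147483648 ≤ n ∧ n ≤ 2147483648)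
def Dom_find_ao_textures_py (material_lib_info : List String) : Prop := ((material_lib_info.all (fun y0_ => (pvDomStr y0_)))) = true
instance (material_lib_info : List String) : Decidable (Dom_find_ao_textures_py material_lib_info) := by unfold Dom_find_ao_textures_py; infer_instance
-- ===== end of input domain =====

-- B replaces A's nested loop with dict mutation by two independent reverse scans
-- (last keyword match per key), for a plainer decomposition; same result, same cost class.


-- ===== PORT A =====
-- texture_type_sorted, a literal dict iterated via .items(): ported as its items list
def textureTypeSorted : List (String × List String) :=
  [("texturesColor", ["diffuse", "diff", "albedo", "alb", "base", "col", "color", "basecolor"]),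
   ("texturesAO", ["ao", "ambient_occlusion", "occlusion", "cavity"])]

def find_ao_textures_py (material_lib_info : List String) : List (String × Option String) :=
  (material_lib_info.foldl (fun result texture =>
      textureTypeSorted.foldl (fun result p =>
        if p.2.contains texture then
          result.insert (if p.1 == "texturesAO" then "ao" else "color") (some texture)
        else result) result)
    (PySem.Dict.ofList [("color", none), ("ao", none)])).items

-- ===== PORT B =====
def colorKeys : List String := ["diffuse", "diff", "albedo", "alb", "base", "col", "color", "basecolor"]
def aoKeys : List String := ["ao", "ambient_occlusion", "occlusion", "cavity"]

def find_ao_textures_py_alt (material_lib_info : List String) : List (String × Option String) :=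
  [("color", material_lib_info.reverse.find? (fun t => colorKeys.contains t)),
   ("ao", material_lib_info.reverse.find? (fun t => aoKeys.contains t))]

-- ===== PRECONDITION & SPEC =====
def Spec_find_ao_textures_py (material_lib_info : List String) (out : List (String × Option String)) : Prop := out = find_ao_textures_py_alt material_lib_info
instance (material_lib_info : List String) (out : List (String × Option String)) : Decidable (Spec_find_ao_textures_py material_lib_info out) := by unfold Spec_find_ao_textures_py; infer_instance

-- ===== CLAIM (what is proved, stated in full; the proofs are below) =====
def Claim_equal_find_ao_textures_py : Prop := ∀ (material_lib_info : List String), Dom_find_ao_textures_py material_lib_info → Spec_find_ao_textures_py material_lib_info (find_ao_textures_py material_lib_info)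

-- ===== LEMMAS AND PROOFS =====

-- loop invariant: A's fold over the two-key dict records, per key, the last keyword match seen
theorem find_ao_loop (xs : List String) : ∀ (c a : Option String),
    xs.foldl (fun result texture =>
      textureTypeSorted.foldl (fun result p =>
        if p.2.contains texture then
          result.insert (if p.1 == "texturesAO" then "ao" else "color") (some texture)
        else result) result)
      (PySem.Dict.mk [("color", c), ("ao", a)])
    = PySem.Dict.mk
        [("color", (xs.reverse.find? (fun t => colorKeys.contains t)).or c),
         ("ao", (xs.reverse.find? (fun t => aoKeys.contains t)).or a)] := by
  induction xs with
  | nil => intro c a; simp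
  | cons x xs ih =>
    intro c a
    simp only [List.foldl_cons, List.reverse_cons, List.find?_append, Option.or_assoc]
    rw [show (textureTypeSorted.foldl (fun result p =>
        if p.2.contains x then
          result.insert (if p.1 == "texturesAO" then "ao" else "color") (some x)
        else result) (PySem.Dict.mk [("color", c), ("ao", a)]))
      = PySem.Dict.mk [("color", if colorKeys.contains x then some x else c),
                       ("ao", if aoKeys.contains x then some x else a)] from ?_]
    · rw [ih]
      have h1 : ∀ (p : String → Bool) (z : String) (c : Option String),
          (List.find? p [z]).or c = if p z then some z else c := by
        intro p z c; cases h : p z <;> simp [List.find?, h]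
      rw [h1, h1]
    · simp only [textureTypeSorted, List.foldl_cons, List.foldl_nil]
      by_cases hc : colorKeys.contains x = true <;> by_cases ha : aoKeys.contains x = true <;>
        simp [colorKeys, aoKeys, PySem.Dict.insert] at hc ha ⊢ <;> simp_all

-- ===== VERDICT (by name: the statement is the Claim_ definition above) =====
theorem find_ao_textures_py_spec : Claim_equal_find_ao_textures_py := by
  intro xs _
  unfold Spec_find_ao_textures_py find_ao_textures_py find_ao_textures_py_alt
  rw [show PySem.Dict.ofList [("color", (none : Option String)), ("ao", none)]
      = PySem.Dict.mk [("color", none), ("ao", none)] from rfl]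
  rw [find_ao_loop]
  simp
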